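-- pv_equiv track=rewrite | github.com/Gyeol0/TIL | Algorithm/String_practice/1221. GNS.py | GNS
-- ===== SOURCE A (Python) =====
-- def GNS(N, arr):
--     result = []
--     # 행성의 숫자를 0~9로 만들 딕셔너리
--     num_str = ['ZRO', 'ONE', 'TWO', 'THR', 'FOR', 'FIV', 'SIX', 'SVN', 'EGT', 'NIN']
--     num_dict = {}
--     for i in range(10):
--         num_dict[num_str[i]] = i
--     # 표현된 문자열 count
--     count = [0 for _ in range(10)]
--     for i in range(N):
--         count[num_dict[arr[i]]] += 1
--     # count 만큼 0~9 순대로 *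
--     for i in range(10):
--         result += [num_str[i]] * count[i]
--     return result
-- ===== SOURCE B (Python) =====
-- def GNS(N, arr):
--     num_str = ['ZRO', 'ONE', 'TWO', 'THR', 'FOR', 'FIV', 'SIX', 'SVN', 'EGT', 'NIN']
--     num_dict = {s: i for i, s in enumerate(num_str)}
--     # stable sort by digit value; equal tokens are identical strings, so the
--     # result matches the counting-sort output exactly
--     return sorted((arr[i] for i in range(N)), key=num_dict.__getitem__)
-- ===== Notes on version B (the rewrite author's own statement) =====
-- stated objective: simpler
-- what changed: Replaces the counting-sort (build a 10-slot count table, then expand blocks 0-9) by a single stable sort of the first N tokens keyed by the token->digit dict; equal tokens are identical strings, so the stable sort reproduces A's output exactly.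
import Mathlib
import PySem

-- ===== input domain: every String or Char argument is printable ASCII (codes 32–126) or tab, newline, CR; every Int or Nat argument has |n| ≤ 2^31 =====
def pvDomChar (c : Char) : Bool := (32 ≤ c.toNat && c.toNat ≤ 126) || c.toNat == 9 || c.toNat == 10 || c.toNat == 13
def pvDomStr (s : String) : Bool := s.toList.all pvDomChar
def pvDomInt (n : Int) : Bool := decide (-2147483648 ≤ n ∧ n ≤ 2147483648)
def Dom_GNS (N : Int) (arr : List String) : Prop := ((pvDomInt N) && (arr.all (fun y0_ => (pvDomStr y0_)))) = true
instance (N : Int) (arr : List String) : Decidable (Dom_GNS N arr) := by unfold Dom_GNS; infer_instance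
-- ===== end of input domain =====

-- B replaces A's counting-sort (count per digit, then expand 0..9) by a single stable
-- key-sort of the first N tokens; equivalence of return values is proved on Pre_GNS.

-- ===== PORT A =====
-- shared helper: the literal num_str table from the source
def numStrGNS : List String := ["ZRO", "ONE", "TWO", "THR", "FOR", "FIV", "SIX", "SVN", "EGT", "NIN"]

def GNS (N : Int) (arr : List String) : List String :=
  let num_str := numStrGNS
  let num_dict : PySem.Dict String Int :=
    (PySem.List.pyRange 0 10 1).foldl
      (fun d i => d.insert ((PySem.List.pyGet? num_str i).getD "") i) PySem.Dict.empty
  -- for i in range(N): count[num_dict[arr[i]]] += 1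
  -- (IndexError / KeyError are excluded by Pre_GNS; the .getD defaults are unreachable there)
  let count : List Int :=
    (PySem.List.pyRange 0 N 1).foldl
      (fun c i =>
        c.set ((num_dict.get? ((PySem.List.pyGet? arr i).getD "")).getD 0).toNat
          (PySem.List.pyGetD c ((num_dict.get? ((PySem.List.pyGet? arr i).getD "")).getD 0) 0 + 1))
      (List.replicate 10 0)
  -- for i in range(10): result += [num_str[i]] * count[i]
  (PySem.List.pyRange 0 10 1).foldl
    (fun res i => res ++ PySem.List.pyRepeat [(PySem.List.pyGet? num_str i).getD ""]
      (PySem.List.pyGetD count i 0)) []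

-- ===== PORT B =====
def GNS_alt (N : Int) (arr : List String) : List String :=
  let num_str := numStrGNS
  let num_dict : PySem.Dict String Int :=
    (PySem.List.enumerate num_str).foldl (fun d p => d.insert p.2 p.1) PySem.Dict.empty
  PySem.List.sorted
    ((PySem.List.pyRange 0 N 1).map (fun i => (PySem.List.pyGet? arr i).getD ""))
    (fun t => (num_dict.get? t).getD 0)

-- ===== PRECONDITION & SPEC =====
-- Pre_ excludes exactly the inputs where the Python A raises: IndexError (N > len(arr))
-- and KeyError (one of the first N entries is not one of the ten tokens).
def Pre_GNS (N : Int) (arr : List String) : Prop :=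
  N ≤ (arr.length : Int) ∧ ∀ s ∈ arr.take N.toNat, s ∈ numStrGNS
instance (N : Int) (arr : List String) : Decidable (Pre_GNS N arr) := by unfold Pre_GNS; infer_instance

def pvWitness_GNS : Int × List String := (3, ["ONE", "ZRO", "ONE"])

def Spec_GNS (N : Int) (arr : List String) (out : List String) : Prop := out = GNS_alt N arr
instance (N : Int) (arr : List String) (out : List String) : Decidable (Spec_GNS N arr out) := by unfold Spec_GNS; infer_instance

-- ===== CLAIM (what is proved, stated in full; the proofs are below) =====
def Claim_equal_GNS : Prop := ∀ (N : Int) (arr : List String), Dom_GNS N arr → Pre_GNS N arr → Spec_GNS N arr (GNS N arr)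

-- ===== LEMMAS AND PROOFS =====

-- the token→digit dictionary, in normal form, and the comparison key it induces
def dGNS : PySem.Dict String Int :=
  PySem.Dict.ofList [("ZRO", 0), ("ONE", 1), ("TWO", 2), ("THR", 3), ("FOR", 4),
                     ("FIV", 5), ("SIX", 6), ("SVN", 7), ("EGT", 8), ("NIN", 9)]

def kfGNS (t : String) : Int := (dGNS.get? t).getD 0
def befGNS (a b : String) : Bool := decide (kfGNS a < kfGNS b)

-- A's count-update loop body, named
def incGNS (c : List Int) (t : String) : List Int :=
  c.set ((dGNS.get? t).getD 0).toNat (PySem.List.pyGetD c ((dGNS.get? t).getD 0) 0 + 1)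

-- A's expansion loop, named
def expandGNS (c : List Int) : List String :=
  (PySem.List.pyRange 0 10 1).foldl
    (fun res i => res ++ PySem.List.pyRepeat [(PySem.List.pyGet? numStrGNS i).getD ""]
      (PySem.List.pyGetD c i 0)) []

-- the counting-sort output shape: one block per digit
def blks (c0 c1 c2 c3 c4 c5 c6 c7 c8 c9 : Int) : List String :=
  List.replicate c0.toNat "ZRO" ++ (List.replicate c1.toNat "ONE" ++ (List.replicate c2.toNat "TWO" ++
  (List.replicate c3.toNat "THR" ++ (List.replicate c4.toNat "FOR" ++ (List.replicate c5.toNat "FIV" ++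
  (List.replicate c6.toNat "SIX" ++ (List.replicate c7.toNat "SVN" ++ (List.replicate c8.toNat "EGT" ++
  List.replicate c9.toNat "NIN"))))))))

lemma dictA_eq :
    (PySem.List.pyRange 0 10 1).foldl
      (fun d i => d.insert ((PySem.List.pyGet? numStrGNS i).getD "") i) PySem.Dict.empty = dGNS := by
  decide

lemma dictB_eq :
    (PySem.List.enumerate numStrGNS).foldl (fun d p => d.insert p.2 p.1) PySem.Dict.empty = dGNS := by
  decide

lemma expand_eq (c0 c1 c2 c3 c4 c5 c6 c7 c8 c9 : Int) :
    expandGNS [c0, c1, c2, c3, c4, c5, c6, c7, c8, c9] = blks c0 c1 c2 c3 c4 c5 c6 c7 c8 c9 := by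
  simp [expandGNS, blks, show PySem.List.pyRange 0 10 1 = [0,1,2,3,4,5,6,7,8,9] from rfl,
    PySem.List.pyRepeat_singleton, PySem.List.pyGetD, PySem.List.pyGet?, PySem.List.pyIdx?, numStrGNS]

lemma ins_skip (x y : String) (h : befGNS x y = false) (n : Nat) (rest : List String) :
    PySem.List.insertBy befGNS x (List.replicate n y ++ rest)
      = List.replicate n y ++ PySem.List.insertBy befGNS x rest := by
  induction n with
  | zero => simp
  | succ m ih => simp [List.replicate_succ, PySem.List.insertBy, h, ih]

lemma ins_front (x : String) (ys : List String) (h : ∀ z ∈ ys, befGNS x z = true) :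
    PySem.List.insertBy befGNS x ys = x :: ys := by
  cases ys with
  | nil => rfl
  | cons z t => simp [PySem.List.insertBy, h z (by simp)]

lemma ins_at (x : String) (n : Nat) (rest : List String)
    (h1 : befGNS x x = false) (h2 : ∀ z ∈ rest, befGNS x z = true) :
    PySem.List.insertBy befGNS x (List.replicate n x ++ rest)
      = List.replicate (n + 1) x ++ rest := by
  rw [ins_skip x x h1, ins_front x rest h2, List.replicate_succ']
  simp

lemma ins_at_end (x : String) (n : Nat) (h1 : befGNS x x = false) :
    PySem.List.insertBy befGNS x (List.replicate n x) = List.replicate (n + 1) x := by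
  have := ins_at x n [] h1 (by simp)
  simpa using this

lemma mainGNS : ∀ (toks : List String), (∀ t ∈ toks, t ∈ numStrGNS) →
    ∀ c0 c1 c2 c3 c4 c5 c6 c7 c8 c9 : Int,
    0 ≤ c0 → 0 ≤ c1 → 0 ≤ c2 → 0 ≤ c3 → 0 ≤ c4 → 0 ≤ c5 → 0 ≤ c6 → 0 ≤ c7 → 0 ≤ c8 → 0 ≤ c9 →
    toks.foldl (fun acc x => PySem.List.insertBy befGNS x acc)
        (blks c0 c1 c2 c3 c4 c5 c6 c7 c8 c9)
      = expandGNS (toks.foldl incGNS [c0, c1, c2, c3, c4, c5, c6, c7, c8, c9]) := by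
  intro toks
  induction toks with
  | nil =>
    intro _ c0 c1 c2 c3 c4 c5 c6 c7 c8 c9 _ _ _ _ _ _ _ _ _ _
    simp [expand_eq]
  | cons x rest ih =>
    intro hmem c0 c1 c2 c3 c4 c5 c6 c7 c8 c9 g0 g1 g2 g3 g4 g5 g6 g7 g8 g9
    have hx : x ∈ numStrGNS := hmem x (by simp)
    have hrest : ∀ t ∈ rest, t ∈ numStrGNS := fun t ht => hmem t (by simp [ht])
    simp only [List.foldl_cons]
    have hx' : x = "ZRO" ∨ x = "ONE" ∨ x = "TWO" ∨ x = "THR" ∨ x = "FOR" ∨ x = "FIV" ∨ x = "SIX" ∨ x = "SVN" ∨ x = "EGT" ∨ x = "NIN" := by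
      simpa [numStrGNS] using hx
    rcases hx' with rfl|rfl|rfl|rfl|rfl|rfl|rfl|rfl|rfl|rfl
    · -- x = "ZRO"
      have e1 : incGNS [c0, c1, c2, c3, c4, c5, c6, c7, c8, c9] "ZRO" = [(c0+1), c1, c2, c3, c4, c5, c6, c7, c8, c9] := rfl
      have hall : ∀ z ∈ List.replicate c1.toNat "ONE" ++ (List.replicate c2.toNat "TWO" ++ (List.replicate c3.toNat "THR" ++ (List.replicate c4.toNat "FOR" ++ (List.replicate c5.toNat "FIV" ++ (List.replicate c6.toNat "SIX" ++ (List.replicate c7.toNat "SVN" ++ (List.replicate c8.toNat "EGT" ++ List.replicate c9.toNat "NIN"))))))), befGNS "ZRO" z = true := by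
        intro z hz
        simp only [List.mem_append, List.mem_replicate] at hz
        -- hz is a nested disjunction over the trailing blocks
        rcases hz with ⟨-, rfl⟩|⟨-, rfl⟩|⟨-, rfl⟩|⟨-, rfl⟩|⟨-, rfl⟩|⟨-, rfl⟩|⟨-, rfl⟩|⟨-, rfl⟩|⟨-, rfl⟩ <;> decide
      have e2 : PySem.List.insertBy befGNS "ZRO" (blks c0 c1 c2 c3 c4 c5 c6 c7 c8 c9) = blks (c0+1) c1 c2 c3 c4 c5 c6 c7 c8 c9 := by
        unfold blks
        rw [ins_at "ZRO" _ _ (by decide) hall,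
          show (c0+1).toNat = c0.toNat + 1 from by omega]
      rw [e1, e2]
      exact ih hrest (c0+1) c1 c2 c3 c4 c5 c6 c7 c8 c9 (by omega) g1 g2 g3 g4 g5 g6 g7 g8 g9
    · -- x = "ONE"
      have e1 : incGNS [c0, c1, c2, c3, c4, c5, c6, c7, c8, c9] "ONE" = [c0, (c1+1), c2, c3, c4, c5, c6, c7, c8, c9] := rfl
      have hall : ∀ z ∈ List.replicate c2.toNat "TWO" ++ (List.replicate c3.toNat "THR" ++ (List.replicate c4.toNat "FOR" ++ (List.replicate c5.toNat "FIV" ++ (List.replicate c6.toNat "SIX" ++ (List.replicate c7.toNat "SVN" ++ (List.replicate c8.toNat "EGT" ++ List.replicate c9.toNat "NIN")))))), befGNS "ONE" z = true := by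
        intro z hz
        simp only [List.mem_append, List.mem_replicate] at hz
        -- hz is a nested disjunction over the trailing blocks
        rcases hz with ⟨-, rfl⟩|⟨-, rfl⟩|⟨-, rfl⟩|⟨-, rfl⟩|⟨-, rfl⟩|⟨-, rfl⟩|⟨-, rfl⟩|⟨-, rfl⟩ <;> decide
      have e2 : PySem.List.insertBy befGNS "ONE" (blks c0 c1 c2 c3 c4 c5 c6 c7 c8 c9) = blks c0 (c1+1) c2 c3 c4 c5 c6 c7 c8 c9 := by
        unfold blks
        rw [ins_skip "ONE" "ZRO" (by decide), ins_at "ONE" _ _ (by decide) hall,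
          show (c1+1).toNat = c1.toNat + 1 from by omega]
      rw [e1, e2]
      exact ih hrest c0 (c1+1) c2 c3 c4 c5 c6 c7 c8 c9 g0 (by omega) g2 g3 g4 g5 g6 g7 g8 g9
    · -- x = "TWO"
      have e1 : incGNS [c0, c1, c2, c3, c4, c5, c6, c7, c8, c9] "TWO" = [c0, c1, (c2+1), c3, c4, c5, c6, c7, c8, c9] := rfl
      have hall : ∀ z ∈ List.replicate c3.toNat "THR" ++ (List.replicate c4.toNat "FOR" ++ (List.replicate c5.toNat "FIV" ++ (List.replicate c6.toNat "SIX" ++ (List.replicate c7.toNat "SVN" ++ (List.replicate c8.toNat "EGT" ++ List.replicate c9.toNat "NIN"))))), befGNS "TWO" z = true := by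
        intro z hz
        simp only [List.mem_append, List.mem_replicate] at hz
        -- hz is a nested disjunction over the trailing blocks
        rcases hz with ⟨-, rfl⟩|⟨-, rfl⟩|⟨-, rfl⟩|⟨-, rfl⟩|⟨-, rfl⟩|⟨-, rfl⟩|⟨-, rfl⟩ <;> decide
      have e2 : PySem.List.insertBy befGNS "TWO" (blks c0 c1 c2 c3 c4 c5 c6 c7 c8 c9) = blks c0 c1 (c2+1) c3 c4 c5 c6 c7 c8 c9 := by
        unfold blks
        rw [ins_skip "TWO" "ZRO" (by decide), ins_skip "TWO" "ONE" (by decide), ins_at "TWO" _ _ (by decide) hall,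
          show (c2+1).toNat = c2.toNat + 1 from by omega]
      rw [e1, e2]
      exact ih hrest c0 c1 (c2+1) c3 c4 c5 c6 c7 c8 c9 g0 g1 (by omega) g3 g4 g5 g6 g7 g8 g9
    · -- x = "THR"
      have e1 : incGNS [c0, c1, c2, c3, c4, c5, c6, c7, c8, c9] "THR" = [c0, c1, c2, (c3+1), c4, c5, c6, c7, c8, c9] := rfl
      have hall : ∀ z ∈ List.replicate c4.toNat "FOR" ++ (List.replicate c5.toNat "FIV" ++ (List.replicate c6.toNat "SIX" ++ (List.replicate c7.toNat "SVN" ++ (List.replicate c8.toNat "EGT" ++ List.replicate c9.toNat "NIN")))), befGNS "THR" z = true := by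
        intro z hz
        simp only [List.mem_append, List.mem_replicate] at hz
        -- hz is a nested disjunction over the trailing blocks
        rcases hz with ⟨-, rfl⟩|⟨-, rfl⟩|⟨-, rfl⟩|⟨-, rfl⟩|⟨-, rfl⟩|⟨-, rfl⟩ <;> decide
      have e2 : PySem.List.insertBy befGNS "THR" (blks c0 c1 c2 c3 c4 c5 c6 c7 c8 c9) = blks c0 c1 c2 (c3+1) c4 c5 c6 c7 c8 c9 := by
        unfold blks
        rw [ins_skip "THR" "ZRO" (by decide), ins_skip "THR" "ONE" (by decide), ins_skip "THR" "TWO" (by decide), ins_at "THR" _ _ (by decide) hall,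
          show (c3+1).toNat = c3.toNat + 1 from by omega]
      rw [e1, e2]
      exact ih hrest c0 c1 c2 (c3+1) c4 c5 c6 c7 c8 c9 g0 g1 g2 (by omega) g4 g5 g6 g7 g8 g9
    · -- x = "FOR"
      have e1 : incGNS [c0, c1, c2, c3, c4, c5, c6, c7, c8, c9] "FOR" = [c0, c1, c2, c3, (c4+1), c5, c6, c7, c8, c9] := rfl
      have hall : ∀ z ∈ List.replicate c5.toNat "FIV" ++ (List.replicate c6.toNat "SIX" ++ (List.replicate c7.toNat "SVN" ++ (List.replicate c8.toNat "EGT" ++ List.replicate c9.toNat "NIN"))), befGNS "FOR" z = true := by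
        intro z hz
        simp only [List.mem_append, List.mem_replicate] at hz
        -- hz is a nested disjunction over the trailing blocks
        rcases hz with ⟨-, rfl⟩|⟨-, rfl⟩|⟨-, rfl⟩|⟨-, rfl⟩|⟨-, rfl⟩ <;> decide
      have e2 : PySem.List.insertBy befGNS "FOR" (blks c0 c1 c2 c3 c4 c5 c6 c7 c8 c9) = blks c0 c1 c2 c3 (c4+1) c5 c6 c7 c8 c9 := by
        unfold blks
        rw [ins_skip "FOR" "ZRO" (by decide), ins_skip "FOR" "ONE" (by decide), ins_skip "FOR" "TWO" (by decide), ins_skip "FOR" "THR" (by decide), ins_at "FOR" _ _ (by decide) hall,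
          show (c4+1).toNat = c4.toNat + 1 from by omega]
      rw [e1, e2]
      exact ih hrest c0 c1 c2 c3 (c4+1) c5 c6 c7 c8 c9 g0 g1 g2 g3 (by omega) g5 g6 g7 g8 g9
    · -- x = "FIV"
      have e1 : incGNS [c0, c1, c2, c3, c4, c5, c6, c7, c8, c9] "FIV" = [c0, c1, c2, c3, c4, (c5+1), c6, c7, c8, c9] := rfl
      have hall : ∀ z ∈ List.replicate c6.toNat "SIX" ++ (List.replicate c7.toNat "SVN" ++ (List.replicate c8.toNat "EGT" ++ List.replicate c9.toNat "NIN")), befGNS "FIV" z = true := by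
        intro z hz
        simp only [List.mem_append, List.mem_replicate] at hz
        -- hz is a nested disjunction over the trailing blocks
        rcases hz with ⟨-, rfl⟩|⟨-, rfl⟩|⟨-, rfl⟩|⟨-, rfl⟩ <;> decide
      have e2 : PySem.List.insertBy befGNS "FIV" (blks c0 c1 c2 c3 c4 c5 c6 c7 c8 c9) = blks c0 c1 c2 c3 c4 (c5+1) c6 c7 c8 c9 := by
        unfold blks
        rw [ins_skip "FIV" "ZRO" (by decide), ins_skip "FIV" "ONE" (by decide), ins_skip "FIV" "TWO" (by decide), ins_skip "FIV" "THR" (by decide), ins_skip "FIV" "FOR" (by decide), ins_at "FIV" _ _ (by decide) hall,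
          show (c5+1).toNat = c5.toNat + 1 from by omega]
      rw [e1, e2]
      exact ih hrest c0 c1 c2 c3 c4 (c5+1) c6 c7 c8 c9 g0 g1 g2 g3 g4 (by omega) g6 g7 g8 g9
    · -- x = "SIX"
      have e1 : incGNS [c0, c1, c2, c3, c4, c5, c6, c7, c8, c9] "SIX" = [c0, c1, c2, c3, c4, c5, (c6+1), c7, c8, c9] := rfl
      have hall : ∀ z ∈ List.replicate c7.toNat "SVN" ++ (List.replicate c8.toNat "EGT" ++ List.replicate c9.toNat "NIN"), befGNS "SIX" z = true := by
        intro z hz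
        simp only [List.mem_append, List.mem_replicate] at hz
        -- hz is a nested disjunction over the trailing blocks
        rcases hz with ⟨-, rfl⟩|⟨-, rfl⟩|⟨-, rfl⟩ <;> decide
      have e2 : PySem.List.insertBy befGNS "SIX" (blks c0 c1 c2 c3 c4 c5 c6 c7 c8 c9) = blks c0 c1 c2 c3 c4 c5 (c6+1) c7 c8 c9 := by
        unfold blks
        rw [ins_skip "SIX" "ZRO" (by decide), ins_skip "SIX" "ONE" (by decide), ins_skip "SIX" "TWO" (by decide), ins_skip "SIX" "THR" (by decide), ins_skip "SIX" "FOR" (by decide), ins_skip "SIX" "FIV" (by decide), ins_at "SIX" _ _ (by decide) hall,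
          show (c6+1).toNat = c6.toNat + 1 from by omega]
      rw [e1, e2]
      exact ih hrest c0 c1 c2 c3 c4 c5 (c6+1) c7 c8 c9 g0 g1 g2 g3 g4 g5 (by omega) g7 g8 g9
    · -- x = "SVN"
      have e1 : incGNS [c0, c1, c2, c3, c4, c5, c6, c7, c8, c9] "SVN" = [c0, c1, c2, c3, c4, c5, c6, (c7+1), c8, c9] := rfl
      have hall : ∀ z ∈ List.replicate c8.toNat "EGT" ++ List.replicate c9.toNat "NIN", befGNS "SVN" z = true := by
        intro z hz
        simp only [List.mem_append, List.mem_replicate] at hz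
        -- hz is a nested disjunction over the trailing blocks
        rcases hz with ⟨-, rfl⟩|⟨-, rfl⟩ <;> decide
      have e2 : PySem.List.insertBy befGNS "SVN" (blks c0 c1 c2 c3 c4 c5 c6 c7 c8 c9) = blks c0 c1 c2 c3 c4 c5 c6 (c7+1) c8 c9 := by
        unfold blks
        rw [ins_skip "SVN" "ZRO" (by decide), ins_skip "SVN" "ONE" (by decide), ins_skip "SVN" "TWO" (by decide), ins_skip "SVN" "THR" (by decide), ins_skip "SVN" "FOR" (by decide), ins_skip "SVN" "FIV" (by decide), ins_skip "SVN" "SIX" (by decide), ins_at "SVN" _ _ (by decide) hall,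
          show (c7+1).toNat = c7.toNat + 1 from by omega]
      rw [e1, e2]
      exact ih hrest c0 c1 c2 c3 c4 c5 c6 (c7+1) c8 c9 g0 g1 g2 g3 g4 g5 g6 (by omega) g8 g9
    · -- x = "EGT"
      have e1 : incGNS [c0, c1, c2, c3, c4, c5, c6, c7, c8, c9] "EGT" = [c0, c1, c2, c3, c4, c5, c6, c7, (c8+1), c9] := rfl
      have hall : ∀ z ∈ List.replicate c9.toNat "NIN", befGNS "EGT" z = true := by
        intro z hz
        simp only [List.mem_replicate] at hz
        rcases hz with ⟨-, rfl⟩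
        decide
      have e2 : PySem.List.insertBy befGNS "EGT" (blks c0 c1 c2 c3 c4 c5 c6 c7 c8 c9) = blks c0 c1 c2 c3 c4 c5 c6 c7 (c8+1) c9 := by
        unfold blks
        rw [ins_skip "EGT" "ZRO" (by decide), ins_skip "EGT" "ONE" (by decide), ins_skip "EGT" "TWO" (by decide), ins_skip "EGT" "THR" (by decide), ins_skip "EGT" "FOR" (by decide), ins_skip "EGT" "FIV" (by decide), ins_skip "EGT" "SIX" (by decide), ins_skip "EGT" "SVN" (by decide), ins_at "EGT" _ _ (by decide) hall,
          show (c8+1).toNat = c8.toNat + 1 from by omega]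
      rw [e1, e2]
      exact ih hrest c0 c1 c2 c3 c4 c5 c6 c7 (c8+1) c9 g0 g1 g2 g3 g4 g5 g6 g7 (by omega) g9
    · -- x = "NIN"
      have e1 : incGNS [c0, c1, c2, c3, c4, c5, c6, c7, c8, c9] "NIN" = [c0, c1, c2, c3, c4, c5, c6, c7, c8, (c9+1)] := rfl
      have e2 : PySem.List.insertBy befGNS "NIN" (blks c0 c1 c2 c3 c4 c5 c6 c7 c8 c9) = blks c0 c1 c2 c3 c4 c5 c6 c7 c8 (c9+1) := by
        unfold blks
        rw [ins_skip "NIN" "ZRO" (by decide), ins_skip "NIN" "ONE" (by decide), ins_skip "NIN" "TWO" (by decide), ins_skip "NIN" "THR" (by decide), ins_skip "NIN" "FOR" (by decide), ins_skip "NIN" "FIV" (by decide), ins_skip "NIN" "SIX" (by decide), ins_skip "NIN" "SVN" (by decide), ins_skip "NIN" "EGT" (by decide), ins_at_end "NIN" _ (by decide),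
          show (c9+1).toNat = c9.toNat + 1 from by omega]
      rw [e1, e2]
      exact ih hrest c0 c1 c2 c3 c4 c5 c6 c7 c8 (c9+1) g0 g1 g2 g3 g4 g5 g6 g7 g8 (by omega)

-- ===== VERDICT (by name: the statement is the Claim_ definition above) =====
lemma toks_mem (N : Int) (arr : List String) (hpre : Pre_GNS N arr) :
    ∀ t ∈ (PySem.List.pyRange 0 N 1).map (fun i => (PySem.List.pyGet? arr i).getD ""), t ∈ numStrGNS := by
  intro t ht
  simp only [List.mem_map] at ht
  obtain ⟨i, hi, rfl⟩ := ht
  rw [PySem.List.mem_pyRange_one] at hi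
  have hlen : i < (arr.length : Int) := lt_of_lt_of_le hi.2 hpre.1
  have hnat : i.toNat < arr.length := by omega
  rw [PySem.List.pyGet?_eq_some_getElem _ hi.1 hlen]
  simp only [Option.getD_some]
  have htake : arr[i.toNat] ∈ arr.take N.toNat := by
    have hilt : i.toNat < N.toNat := by omega
    have : (arr.take N.toNat)[i.toNat]'(by simp; omega) = arr[i.toNat] := List.getElem_take
    rw [← this]
    exact List.getElem_mem _
  exact hpre.2 _ htake

theorem GNS_spec : Claim_equal_GNS := by
  intro N arr _ hpre
  unfold Spec_GNS GNS GNS_alt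
  simp only [dictA_eq, dictB_eq]
  rw [PySem.List.sorted_eq_foldl_insertBy]
  rw [show (PySem.List.pyRange 0 N 1).foldl
        (fun c i =>
          c.set (((dGNS.get? ((PySem.List.pyGet? arr i).getD "")).getD 0).toNat)
            (PySem.List.pyGetD c ((dGNS.get? ((PySem.List.pyGet? arr i).getD "")).getD 0) 0 + 1))
        (List.replicate 10 0)
      = ((PySem.List.pyRange 0 N 1).map (fun i => (PySem.List.pyGet? arr i).getD "")).foldl
          incGNS (List.replicate 10 0) from (List.foldl_map (f := fun i => (PySem.List.pyGet? arr i).getD "") (g := incGNS)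
        (l := PySem.List.pyRange 0 N 1) (init := (List.replicate 10 0 : List Int))).symm]
  exact (mainGNS _ (toks_mem N arr hpre) 0 0 0 0 0 0 0 0 0 0 (le_refl 0) (le_refl 0) (le_refl 0)
    (le_refl 0) (le_refl 0) (le_refl 0) (le_refl 0) (le_refl 0) (le_refl 0) (le_refl 0)).symm
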